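-- pv_equiv track=rewrite | github.com/ComfyAssets/ComfyUI_PromptManager | utils/validators.py | sanitize_input
-- ===== SOURCE A (Python) =====
-- def sanitize_input(text: str) -> str:
--     """
--     Sanitize text input by removing potentially harmful content.
--
--     Cleans text input by removing control characters, normalizing whitespace,
--     and limiting excessive empty lines. Preserves the semantic content while
--     ensuring safe storage and display.
--
--     Args:
--         text: The text string to sanitize
--
--     Returns:
--         Sanitized text string with:
--         - Null bytes and control characters removed
--         - Normalized line endings (\r\n and \r converted to \n)
--         - Trimmed whitespace on each line
--         - Limited consecutive empty lines (maximum 2)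
--         - Overall trimmed result
--     """
--     if not isinstance(text, str):
--         return ""
--
--     # Remove null bytes and other control characters
--     sanitized = text.replace("\x00", "").replace("\r\n", "\n").replace("\r", "\n")
--
--     # Strip excessive whitespace but preserve single newlines
--     lines = sanitized.split("\n")
--     sanitized_lines = [line.strip() for line in lines]
--
--     # Remove excessive empty lines (keep max 2 consecutive)
--     result_lines = []
--     empty_count = 0
--
--     for line in sanitized_lines:
--         if not line:
--             empty_count += 1
--             if empty_count <= 2:
--                 result_lines.append(line)
--         else:
--             empty_count = 0
--             result_lines.append(line)
--
--     return "\n".join(result_lines).strip()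
-- ===== SOURCE B (Python) =====
-- def sanitize_input(text: str) -> str:
--     if not isinstance(text, str):
--         return ""
--     s = text.replace("\x00", "").replace("\r\n", "\n").replace("\r", "\n")
--     lines = [line.strip() for line in s.split("\n")]
--     # keep a line unless it and its two predecessors are all empty
--     kept = [cur for cur, prev1, prev2 in zip(lines, ["#"] + lines, ["#", "#"] + lines)
--             if cur or prev1 or prev2]
--     return "\n".join(kept).strip()
-- ===== Notes on version B (the rewrite author's own statement) =====
-- stated objective: simpler
-- what changed: Replaced the stateful empty-line-counter loop with a stateless comprehension that zips each stripped line with its two predecessors (shifted copies of the list) and keeps a line unless it and both predecessors are empty.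
import Mathlib
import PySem

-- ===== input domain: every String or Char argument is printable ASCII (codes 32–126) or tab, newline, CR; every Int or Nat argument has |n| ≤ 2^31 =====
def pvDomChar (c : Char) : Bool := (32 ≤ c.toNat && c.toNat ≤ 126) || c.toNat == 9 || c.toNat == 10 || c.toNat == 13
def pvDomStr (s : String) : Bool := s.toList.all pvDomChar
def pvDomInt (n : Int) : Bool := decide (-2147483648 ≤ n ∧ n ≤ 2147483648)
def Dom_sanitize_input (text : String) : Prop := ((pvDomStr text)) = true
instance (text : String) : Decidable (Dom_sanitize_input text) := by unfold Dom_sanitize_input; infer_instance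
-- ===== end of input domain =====

-- B replaces A's stateful empty-line counter by a stateless zip-with-two-shifted-copies filter (simpler decomposition, same cost).

-- ===== PORT A =====
-- literal port of A: the isinstance guard is vacuous for a String argument and is omitted
def sanitize_input (text : String) : String :=
  let sanitized := PySem.Str.replace (PySem.Str.replace (PySem.Str.replace text "\x00" "") "\r\n" "\n") "\r" "\n"
  let lines := (PySem.Str.split? sanitized "\n").getD []   -- sep = "\n" ≠ "", so split? is some
  let sanitized_lines := lines.map PySem.Str.strip
  let st := sanitized_lines.foldl
    (fun (acc : List String × Int) line =>
      if line = "" then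
        let c := acc.2 + 1
        if c ≤ 2 then (acc.1 ++ [line], c) else (acc.1, c)
      else (acc.1 ++ [line], 0))
    ([], 0)
  PySem.Str.strip (PySem.Str.join "\n" st.1)

-- ===== PORT B =====
def sanitize_input_alt (text : String) : String :=
  let s := PySem.Str.replace (PySem.Str.replace (PySem.Str.replace text "\x00" "") "\r\n" "\n") "\r" "\n"
  let lines := ((PySem.Str.split? s "\n").getD []).map PySem.Str.strip
  let kept := ((lines.zip (("#" :: lines).zip ("#" :: "#" :: lines))).filter
      (fun p => p.1 != "" || p.2.1 != "" || p.2.2 != "")).map (·.1)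
  PySem.Str.strip (PySem.Str.join "\n" kept)

-- ===== PRECONDITION & SPEC =====
def Spec_sanitize_input (text : String) (out : String) : Prop := out = sanitize_input_alt text
instance (text : String) (out : String) : Decidable (Spec_sanitize_input text out) := by unfold Spec_sanitize_input; infer_instance

-- ===== CLAIM (what is proved, stated in full; the proofs are below) =====
def Claim_equal_sanitize_input : Prop := ∀ (text : String), Dom_sanitize_input text → Spec_sanitize_input text (sanitize_input text)

-- ===== LEMMAS AND PROOFS =====

-- A's counter loop and B's shifted-zip filter agree: the counter's value is mirrored
-- by the emptiness of the two previously seen lines (p1, p2).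
lemma sanitize_loop_eq (ls : List String) : ∀ (acc : List String) (cnt : Int) (p1 p2 : String),
    0 ≤ cnt → (1 ≤ cnt ↔ p1 = "") → (2 ≤ cnt ↔ (p1 = "" ∧ p2 = "")) →
    (ls.foldl
      (fun (acc : List String × Int) line =>
        if line = "" then
          let c := acc.2 + 1
          if c ≤ 2 then (acc.1 ++ [line], c) else (acc.1, c)
        else (acc.1 ++ [line], 0))
      (acc, cnt)).1
    = acc ++ ((ls.zip ((p1 :: ls).zip (p2 :: p1 :: ls))).filter
        (fun p => p.1 != "" || p.2.1 != "" || p.2.2 != "")).map (·.1) := by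
  induction ls with
  | nil => simp
  | cons l rest ih =>
    intro acc cnt p1 p2 h0 h1 h2
    by_cases hl : l = ""
    · subst hl
      by_cases hc : cnt + 1 ≤ 2
      · have hp : ¬ (p1 = "" ∧ p2 = "") := by rw [← h2]; omega
        have hb : (("" : String) != "" || p1 != "" || p2 != "") = true := by
          rcases not_and_or.mp hp with h | h <;> simp [bne_iff_ne, h]
        simp only [List.foldl_cons, List.zip_cons_cons, List.filter_cons, hb, hc, if_true]
        rw [ih (acc ++ [""]) (cnt + 1) "" p1 (by omega)
            (iff_of_true (by omega) rfl)
            (by rw [show ((("" : String) = "" ∧ p1 = "")) ↔ p1 = "" from by simp, ← h1]; omega)]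
        simp
      · have hp : p1 = "" ∧ p2 = "" := h2.mp (by omega)
        have hb : (("" : String) != "" || p1 != "" || p2 != "") = false := by
          simp [hp.1, hp.2]
        simp only [List.foldl_cons, List.zip_cons_cons, List.filter_cons, hb, hc, if_true, if_false, Bool.false_eq_true]
        rw [ih acc (cnt + 1) "" p1 (by omega)
            (iff_of_true (by omega) rfl)
            (iff_of_true (by omega) ⟨rfl, hp.1⟩)]
        simp only [List.zip_cons_cons]
    · have hb : ((l : String) != "" || p1 != "" || p2 != "") = true := by simp [bne_iff_ne, hl]
      simp only [List.foldl_cons, List.zip_cons_cons, List.filter_cons, hb, if_neg hl, if_true]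
      rw [ih (acc ++ [l]) 0 l p1 le_rfl
          (iff_of_false (by omega) hl)
          (iff_of_false (by omega) (fun h => hl h.1))]
      simp

theorem sanitize_input_spec : Claim_equal_sanitize_input := by
  intro text _
  simp only [Spec_sanitize_input, sanitize_input, sanitize_input_alt]
  rw [sanitize_loop_eq _ [] 0 "#" "#" le_rfl
      (iff_of_false (by omega) (by decide))
      (iff_of_false (by omega) (fun h => by exact absurd h.1 (by decide)))]
  simp
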